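-- pv_equiv track=rewrite | github.com/StarSein/BaekJoon | 백준/Gold/2169. 로봇 조종하기/로봇 조종하기.py | solution
-- ===== SOURCE A (Python) =====
-- from typing import Tuple
--
-- def solution(n: int, m: int, grid: Tuple[Tuple[int, ...]]) -> int:
--     dp = [[[grid[row][col]] * 3 for col in range(m)] for row in range(n)]
--
--     for col in range(1, m):
--         dp[0][col][0] += dp[0][col - 1][0]
--         dp[0][col][1] += dp[0][col - 1][1]
--         dp[0][col][2] += dp[0][col - 1][2]
--
--     for row in range(1, n):
--         for col in range(m):
--             max_val = max(dp[row - 1][col])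
--             dp[row][col][0] += max_val
--
--         dp[row][0][1] += max(dp[row - 1][0])
--         for col in range(1, m):
--             max_val = max(dp[row][col - 1][0], dp[row][col - 1][1])
--             dp[row][col][1] += max_val
--
--         dp[row][m - 1][2] += max(dp[row - 1][m - 1])
--         for col in range(m - 2, -1, -1):
--             max_val = max(dp[row][col + 1][0], dp[row][col + 1][2])
--             dp[row][col][2] += max_val
--
--     return max(dp[n - 1][m - 1])
-- ===== SOURCE B (Python) =====
-- def solution(n, m, grid):
--     # Entry-point formulation: the best path to (r, c) drops into row r at some
--     # column j and then walks straight to c, so its value is a prefix-sum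
--     # expression in j and c; per row we take running prefix/suffix maxima over
--     # the entry columns instead of a per-cell DP recurrence.
--     pref = []
--     s = 0
--     for c in range(m):
--         s += grid[0][c]
--         pref.append(s)
--     prev = pref
--     for r in range(1, n):
--         row = grid[r]
--         pref = []
--         s = 0
--         for c in range(m):
--             s += row[c]
--             pref.append(s)
--         # enter at j <= c, walk right: prev[j] + pref[c] - pref[j-1]
--         pm = []
--         best = None
--         for c in range(m):
--             a = prev[c] - pref[c] + row[c]
--             best = a if best is None or a > best else best
--             pm.append(best)
--         # enter at j >= c, walk left: prev[j] + pref[j] - pref[c-1]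
--         sm = [0] * m
--         best = None
--         for c in range(m - 1, -1, -1):
--             b = prev[c] + pref[c]
--             best = b if best is None or b > best else best
--             sm[c] = best
--         prev = [max(pref[c] + pm[c], sm[c] - pref[c] + row[c]) for c in range(m)]
--     return prev[m - 1]
-- ===== Notes on version B (the rewrite author's own statement) =====
-- stated objective: alternative
-- what changed: Replaces A's n×m×3 table of per-cell directional DP states by an entry-point formulation: for each row the value at column c is a closed prefix-sum expression over the column j where the path drops into the row, so one prefix-max and one suffix-max scan over entry columns replace the per-cell DP recurrences, and only one 1D row is kept (O(m) memory).
import Mathlib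
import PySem

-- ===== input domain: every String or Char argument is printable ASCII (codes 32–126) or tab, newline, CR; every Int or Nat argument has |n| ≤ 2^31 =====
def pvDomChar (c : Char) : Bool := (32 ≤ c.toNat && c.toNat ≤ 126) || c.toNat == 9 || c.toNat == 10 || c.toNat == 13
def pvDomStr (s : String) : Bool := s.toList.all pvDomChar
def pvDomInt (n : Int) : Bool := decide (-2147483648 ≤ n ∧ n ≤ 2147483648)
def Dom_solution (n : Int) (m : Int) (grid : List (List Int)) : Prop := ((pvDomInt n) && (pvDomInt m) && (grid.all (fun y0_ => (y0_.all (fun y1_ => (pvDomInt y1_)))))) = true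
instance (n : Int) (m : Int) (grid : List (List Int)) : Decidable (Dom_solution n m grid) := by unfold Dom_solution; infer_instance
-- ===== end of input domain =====

-- B replaces A's n×m×3 DP table by an entry-point formulation (prefix sums plus
-- prefix/suffix maxima over the drop-in column per row); same return value, O(m) memory.

-- ===== PORT A =====
-- A's dp cell dp[row][col] is the 3-slot list [s0,s1,s2], ported as a triple.
def mx3 (c : Int × Int × Int) : Int := max c.1 (max c.2.1 c.2.2)

-- row-0 loop: for col in range(1,m): dp[0][col][k] += dp[0][col-1][k], k=0,1,2
def aRow0 : (Int × Int × Int) → List (Int × Int × Int) → List (Int × Int × Int)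
  | _, [] => []
  | p, c :: rest =>
      let c' := (c.1 + p.1, c.2.1 + p.2.1, c.2.2 + p.2.2)
      c' :: aRow0 c' rest

-- for col in range(1,m): dp[row][col][1] += max(dp[row][col-1][0], dp[row][col-1][1])
def aSweepL : (Int × Int × Int) → List (Int × Int × Int) → List (Int × Int × Int)
  | _, [] => []
  | p, c :: rest =>
      let c' := (c.1, c.2.1 + max p.1 p.2.1, c.2.2)
      c' :: aSweepL c' rest

-- for col in range(m-2,-1,-1): dp[row][col][2] += max(dp[row][col+1][0], dp[row][col+1][2]);
-- seeded at col m-1 with max(dp[row-1][m-1]); ported as structural recursion from the right.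
def aSweepR (seed : Int) : List (Int × Int × Int) → List (Int × Int × Int)
  | [] => []
  | [c] => [(c.1, c.2.1, c.2.2 + seed)]
  | c :: c2 :: rest =>
      let rest' := aSweepR seed (c2 :: rest)
      let nxt := rest'.headD (0, 0, 0)
      (c.1, c.2.1, c.2.2 + max nxt.1 nxt.2.2) :: rest'

-- body of `for row in range(1,n)`: P = dp[row-1], gs = grid row (first m entries)
def aStep (P : List (Int × Int × Int)) (gs : List Int) : List (Int × Int × Int) :=
  let C := gs.map (fun g => (g, g, g))                     -- dp[row] as initialised
  let C0 := List.zipWith (fun p c => (c.1 + mx3 p, c.2.1, c.2.2)) P C   -- slot-0 loop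
  let C1 := match C0 with                                   -- slot-1 seeding + left sweep
    | [] => []
    | c :: rest =>
        let c' := (c.1, c.2.1 + mx3 (P.headD (0, 0, 0)), c.2.2)
        c' :: aSweepL c' rest
  aSweepR (mx3 (P.getLastD (0, 0, 0))) C1                   -- slot-2 seeding + right sweep

def aRows (P : List (Int × Int × Int)) : List (List Int) → List (Int × Int × Int)
  | [] => P
  | g :: rest => aRows (aStep P g) rest

def solution (n : Int) (m : Int) (grid : List (List Int)) : Int :=
  let rows := (grid.take n.toNat).map (fun r => r.take m.toNat)  -- the n×m entries A reads
  let dp0 := match (rows.headD []).map (fun g => (g, g, g)) with -- dp[0] after the row-0 loop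
    | [] => []
    | c :: rest => c :: aRow0 c rest
  mx3 ((aRows dp0 rows.tail).getLastD (0, 0, 0))                 -- max(dp[n-1][m-1])

-- ===== PORT B =====
-- the prefix-sum loop of Source B (`s += row[c]; pref.append(s)`)
def prefSums (s : Int) : List Int → List Int
  | [] => []
  | g :: rest => (s + g) :: prefSums (s + g) rest

-- running prefix maximum with carried `best` (the `pm` loop after its first step)
def pmGo (best : Int) : List Int → List Int
  | [] => []
  | a :: rest => max best a :: pmGo (max best a) rest

-- the `pm` loop: best starts as None, i.e. the first element seeds it
def pmaxScan : List Int → List Int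
  | [] => []
  | a :: rest => a :: pmGo a rest

-- the `sm` loop (backwards): running suffix maximum, ported as recursion from the right
def smaxScan : List Int → List Int
  | [] => []
  | [b] => [b]
  | b :: b2 :: rest =>
      let t := smaxScan (b2 :: rest)
      max b (t.headD 0) :: t

-- three-list pointwise combination (Source B's index-parallel loops over lists of equal length)
def zip3With (f : Int → Int → Int → Int) : List Int → List Int → List Int → List Int
  | p :: ps, q :: qs, g :: gs => f p q g :: zip3With f ps qs gs
  | _, _, _ => []

-- body of `for r in range(1, n)` in Source B
def bStep (prev gs : List Int) : List Int :=
  let pref := prefSums 0 gs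
  let pm := pmaxScan (zip3With (fun p q g => p - q + g) prev pref gs)   -- a = prev[c]-pref[c]+row[c]
  let sm := smaxScan (List.zipWith (fun p q => p + q) prev pref)        -- b = prev[c]+pref[c]
  zip3With (fun q pmv d => max (q + pmv) (d - q)) pref pm (List.zipWith (fun s g => s + g) sm gs)

def bRows (prev : List Int) : List (List Int) → List Int
  | [] => prev
  | g :: rest => bRows (bStep prev g) rest

def solution_alt (n : Int) (m : Int) (grid : List (List Int)) : Int :=
  let row0 := (grid.headD []).take m.toNat          -- grid[0][:m], the entries the first loop reads
  let prev0 := prefSums 0 row0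
  let rows := ((grid.drop 1).take (n - 1).toNat).map (fun r => r.take m.toNat)  -- grid[1..n-1]
  (bRows prev0 rows).getLastD 0                     -- prev[m-1]

-- ===== PRECONDITION & SPEC =====
-- Exactly the inputs on which the Python A returns: n,m ≥ 1 and the first n grid rows
-- exist with at least m entries each (otherwise A raises IndexError).
def Pre_solution (n : Int) (m : Int) (grid : List (List Int)) : Prop :=
  1 ≤ n ∧ 1 ≤ m ∧ n ≤ (grid.length : Int) ∧ ∀ r ∈ grid.take n.toNat, m ≤ (r.length : Int)
instance (n : Int) (m : Int) (grid : List (List Int)) : Decidable (Pre_solution n m grid) := by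
  unfold Pre_solution; infer_instance

def pvWitness_solution : Int × Int × List (List Int) := (2, 2, [[1, 2], [3, 4]])

def Spec_solution (n : Int) (m : Int) (grid : List (List Int)) (out : Int) : Prop := out = solution_alt n m grid
instance (n : Int) (m : Int) (grid : List (List Int)) (out : Int) : Decidable (Spec_solution n m grid out) := by unfold Spec_solution; infer_instance

-- ===== CLAIM (what is proved, stated in full; the proofs are below) =====
def Claim_equal_solution : Prop := ∀ (n : Int) (m : Int) (grid : List (List Int)), Dom_solution n m grid → Pre_solution n m grid → Spec_solution n m grid (solution n m grid)

-- ===== LEMMAS AND PROOFS =====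

-- proof-only helpers: the intermediate "per-cell sweep" view bridging A's 3-slot DP and
-- B's entry-point formulation
def triC (g : Int) : Int × Int × Int := (g, g, g)
def liftC (x : Int × Int) : Int × Int × Int := (x.1, x.2, x.2)
def pr02 (c : Int × Int × Int) : Int × Int := (c.1, c.2.2)
def pr01 (c : Int × Int × Int) : Int × Int := (c.1, c.2.1)
def mxs1 (c : Int × Int × Int) : Int := max c.1 c.2.1
def mxs2 (c : Int × Int × Int) : Int := max c.1 c.2.2
def Qf (p : Int × Int × Int) (g : Int) : Int × Int := (g + mx3 p, g)

def bSweep (v : Int) : List (Int × Int) → List Int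
  | [] => []
  | (u, g) :: rest => max u (v + g) :: bSweep (max u (v + g)) rest

def bSweep0 : List (Int × Int) → List Int
  | [] => []
  | (u, _) :: rest => u :: bSweep u rest

-- reference right-to-left sweep (value view of A's slot-0/2 maxima)
def rspec : List (Int × Int) → List Int
  | [] => []
  | (u, g) :: rest =>
      match rspec rest with
      | [] => [u]
      | v :: vs => max u (g + v) :: v :: vs

-- the sweep view of one row step (A's per-cell maxima as values)
def sweepStep (prev : List Int) (gs : List Int) : List Int :=
  let up := List.zipWith (fun p g => g + p) prev gs
  let pairs := up.zip gs
  List.zipWith max (bSweep0 pairs) (rspec pairs)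

theorem mx3_tri (g : Int) : mx3 (triC g) = g := by
  simp [mx3, triC]

theorem mx3_split (c : Int × Int × Int) : mx3 c = max (mxs1 c) (mxs2 c) := by
  rcases c with ⟨a, b, d⟩
  simp only [mx3, mxs1, mxs2]
  omega

theorem prefSums_length (gs : List Int) (s : Int) : (prefSums s gs).length = gs.length := by
  induction gs generalizing s with
  | nil => rfl
  | cons g rest ih => simp [prefSums, ih]

theorem row0_eq (gs : List Int) (s : Int) :
    aRow0 (triC s) (gs.map triC) = (prefSums s gs).map triC := by
  induction gs generalizing s with
  | nil => rfl
  | cons g rest ih =>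
      simp only [List.map_cons, aRow0, prefSums, triC]
      rw [Int.add_comm g s]
      exact congrArg _ (by simpa [triC] using ih (s + g))

theorem dp0_eq (g0 : List Int) :
    (match g0.map triC with
      | [] => ([] : List (Int × Int × Int))
      | c :: rest => c :: aRow0 c rest) = (prefSums 0 g0).map triC := by
  cases g0 with
  | nil => rfl
  | cons g rest =>
      simp only [List.map_cons, prefSums, Int.zero_add]
      exact congrArg _ (row0_eq rest g)

theorem aSweepL_proj (cs : List (Int × Int × Int)) (p : Int × Int × Int) :
    (aSweepL p cs).map pr02 = cs.map pr02 := by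
  induction cs generalizing p with
  | nil => rfl
  | cons c rest ih => simp [aSweepL, pr02, ih]

theorem aSweepL_length (cs : List (Int × Int × Int)) (p : Int × Int × Int) :
    (aSweepL p cs).length = cs.length := by
  have h := congrArg List.length (aSweepL_proj cs p)
  simpa using h

theorem sweepL_eq (q : List (Int × Int)) (p : Int × Int × Int) (v : Int)
    (hv : v = max p.1 p.2.1) :
    (aSweepL p (q.map liftC)).map mxs1 = bSweep v q := by
  induction q generalizing p v with
  | nil => rfl
  | cons x rest ih =>
      rcases x with ⟨u, g⟩
      simp only [List.map_cons, aSweepL, bSweep, liftC, mxs1]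
      subst hv
      rw [Int.add_comm g (max p.1 p.2.1)]
      exact congrArg _ (ih _ _ rfl)

theorem aSweepR_proj (seed : Int) (cs : List (Int × Int × Int)) :
    (aSweepR seed cs).map pr01 = cs.map pr01 := by
  induction cs with
  | nil => rfl
  | cons c rest ih =>
      cases rest with
      | nil => simp [aSweepR, pr01]
      | cons c2 rest2 =>
          simp only [aSweepR, List.map_cons, pr01] at ih ⊢
          rw [ih]

theorem aSweepR_length (seed : Int) (cs : List (Int × Int × Int)) :
    (aSweepR seed cs).length = cs.length := by
  have h := congrArg List.length (aSweepR_proj seed cs)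
  simpa using h

theorem sweepR_eq (seed : Int) (cs : List (Int × Int × Int))
    (hlast : (cs.getLastD (0,0,0)).1 = (cs.getLastD (0,0,0)).2.2 + seed) :
    (aSweepR seed cs).map mxs2 = rspec (cs.map pr02) := by
  induction cs with
  | nil => rfl
  | cons c rest ih =>
      cases rest with
      | nil =>
          simp only [List.getLastD_cons, List.getLastD_nil] at hlast
          simp [aSweepR, rspec, mxs2, pr02, ← hlast]
      | cons c2 rest2 =>
          have hl : ((c :: c2 :: rest2).getLastD (0,0,0)) = ((c2 :: rest2).getLastD (0,0,0)) := by
            simp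
          rw [hl] at hlast
          have ih' := ih hlast
          cases hR : aSweepR seed (c2 :: rest2) with
          | nil =>
              have := congrArg List.length hR
              simp [aSweepR_length] at this
          | cons r1 rs =>
              rw [hR] at ih'
              simp only [aSweepR, hR, List.map_cons, rspec, pr02, mxs2] at ih' ⊢
              rw [← ih']
              simp only [List.headD_cons]

theorem rspec_length (xs : List (Int × Int)) : (rspec xs).length = xs.length := by
  induction xs with
  | nil => rfl
  | cons x rest ih =>
      rcases x with ⟨u, g⟩
      simp only [rspec]
      cases h : rspec rest with
      | nil =>
          rw [h] at ih
          simp [← ih]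
      | cons v vs =>
          rw [h] at ih
          simp [← ih]

theorem C0_eq (P : List (Int × Int × Int)) (gs : List Int) :
    List.zipWith (fun p c => (c.1 + mx3 p, c.2.1, c.2.2)) P (gs.map triC)
      = (List.zipWith Qf P gs).map liftC := by
  induction P generalizing gs with
  | nil => rfl
  | cons p P ih =>
      cases gs with
      | nil => rfl
      | cons g gs =>
          simp only [List.map_cons, List.zipWith_cons_cons, ih, triC, liftC, Qf]

theorem up_eq (P : List (Int × Int × Int)) (gs : List Int) :
    List.zipWith (fun p g => g + p) (P.map mx3) gs = (List.zipWith Qf P gs).map Prod.fst := by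
  induction P generalizing gs with
  | nil => rfl
  | cons p P ih =>
      cases gs with
      | nil => rfl
      | cons g gs => simp [Qf, ih]

theorem pairs_eq (P : List (Int × Int × Int)) (gs : List Int) :
    ((List.zipWith Qf P gs).map Prod.fst).zip gs = List.zipWith Qf P gs := by
  induction P generalizing gs with
  | nil => rfl
  | cons p P ih =>
      cases gs with
      | nil => rfl
      | cons g gs =>
          simp only [List.map_cons, List.zipWith_cons_cons, List.zip_cons_cons, ih]
          simp [Qf]

theorem zipWith_getLastD {α β γ : Type} (f : α → β → γ) :
    ∀ (P : List α) (gs : List β) (dz : γ) (da : α) (db : β), P.length = gs.length → P ≠ [] →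
    (List.zipWith f P gs).getLastD dz = f (P.getLastD da) (gs.getLastD db) := by
  intro P
  induction P with
  | nil => intro gs dz da db h hne; exact absurd rfl hne
  | cons p P ih =>
      intro gs dz da db h hne
      cases gs with
      | nil => simp at h
      | cons g gs =>
          cases P with
          | nil =>
              cases gs with
              | nil => simp
              | cons g2 gs2 => simp at h
          | cons p2 P2 =>
              cases gs with
              | nil => simp at h
              | cons g2 gs2 =>
                  rw [List.zipWith_cons_cons, List.getLastD_cons,
                    show (p :: p2 :: P2).getLastD da = (p2 :: P2).getLastD p by rw [List.getLastD_cons],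
                    show (g :: g2 :: gs2).getLastD db = (g2 :: gs2).getLastD g by rw [List.getLastD_cons]]
                  exact ih (g2 :: gs2) (f p g) p g (by simpa using h) (by simp)

theorem zip_max_map {α : Type} (xs : List α) (f g : α → Int) :
    List.zipWith max (xs.map f) (xs.map g) = xs.map (fun c => max (f c) (g c)) := by
  induction xs with
  | nil => rfl
  | cons x rest ih => simp [ih]

theorem getLastD_map_ne {α β : Type} (f : α → β) :
    ∀ (xs : List α), xs ≠ [] → ∀ (d : β) (e : α), (xs.map f).getLastD d = f (xs.getLastD e) := by
  intro xs
  induction xs with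
  | nil => intro h; exact absurd rfl h
  | cons x rest ih =>
      intro _ d e
      cases rest with
      | nil => simp
      | cons y rest2 =>
          rw [List.map_cons, List.getLastD_cons, List.getLastD_cons]
          exact ih (by simp) (f x) x

theorem aStep_length (P : List (Int × Int × Int)) (gs : List Int) :
    (aStep P gs).length = min P.length gs.length := by
  simp only [aStep]
  rw [aSweepR_length]
  cases h : List.zipWith (fun p c => (c.1 + mx3 p, c.2.1, c.2.2)) P (gs.map (fun g => (g, g, g))) with
  | nil =>
      have := congrArg List.length h
      simp only [List.length_zipWith, List.length_map, List.length_nil] at this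
      simp only [List.length_nil]
      omega
  | cons c rest =>
      have := congrArg List.length h
      simp only [List.length_zipWith, List.length_map, List.length_cons] at this
      simp only [List.length_cons, aSweepL_length]
      omega

-- A's per-row step, viewed through mx3, is the two-sweep value computation
theorem stepA_eq_sweep (P : List (Int × Int × Int)) (gs : List Int) (h : P.length = gs.length) :
    sweepStep (P.map mx3) gs = (aStep P gs).map mx3 := by
  cases P with
  | nil =>
      cases gs with
      | nil => rfl
      | cons g gs => simp at h
  | cons p P' =>
      cases gs with
      | nil => simp at h
      | cons g gs' =>
          have h' : P'.length = gs'.length := by simpa using h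
          simp only [sweepStep, aStep]
          rw [show (fun g : Int => ((g, g, g) : Int × Int × Int)) = triC from rfl]
          rw [C0_eq, up_eq, pairs_eq]
          have hz : List.zipWith Qf (p :: P') (g :: gs')
              = (g + mx3 p, g) :: List.zipWith Qf P' gs' := by simp [Qf]
          rw [hz]
          simp only [List.map_cons, liftC, List.headD_cons]
          set Qt := List.zipWith Qf P' gs' with hQt
          set c' : Int × Int × Int := (g + mx3 p, g + mx3 p, g) with hc'
          set C1 : List (Int × Int × Int) := c' :: aSweepL c' (Qt.map liftC) with hC1
          set seed := mx3 ((p :: P').getLastD (0, 0, 0)) with hseed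
          have hL : C1.map mxs1 = bSweep0 ((g + mx3 p, g) :: Qt) := by
            rw [hC1, List.map_cons, bSweep0]
            rw [show mxs1 c' = g + mx3 p from by simp [mxs1, hc']]
            exact congrArg _ (sweepL_eq Qt c' (g + mx3 p) (by simp [hc']))
          have hproj : C1.map pr02 = (g + mx3 p, g) :: Qt := by
            rw [hC1, List.map_cons, aSweepL_proj, List.map_map]
            have hco : pr02 ∘ liftC = id := by funext x; simp [pr02, liftC]
            rw [hco, List.map_id]
            simp [pr02, hc']
          have hC1ne : C1 ≠ [] := by simp [hC1]
          have hQlast : ((g + mx3 p, g) :: Qt).getLastD (0, 0)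
              = Qf ((p :: P').getLastD (0, 0, 0)) ((g :: gs').getLastD 0) := by
            rw [hQt, ← hz]
            exact zipWith_getLastD Qf (p :: P') (g :: gs') (0, 0) (0, 0, 0) 0 h (by simp)
          have hlast : (C1.getLastD (0, 0, 0)).1 = (C1.getLastD (0, 0, 0)).2.2 + seed := by
            have hp := getLastD_map_ne pr02 C1 hC1ne (0, 0) (0, 0, 0)
            rw [hproj, hQlast] at hp
            have h1 := congrArg Prod.fst hp
            have h2 := congrArg Prod.snd hp
            simp only [pr02, Qf] at h1 h2
            rw [hseed]
            omega
          have hR : (aSweepR seed C1).map mxs2 = rspec ((g + mx3 p, g) :: Qt) := by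
            rw [← hproj]
            exact sweepR_eq seed C1 hlast
          have hL2 : (aSweepR seed C1).map mxs1 = C1.map mxs1 := by
            have hq := congrArg (List.map (fun x : Int × Int => max x.1 x.2))
              (aSweepR_proj seed C1)
            simpa [List.map_map, Function.comp, mxs1, pr01] using hq
          rw [← hL, ← hL2, ← hR, zip_max_map]
          exact List.map_congr_left (fun c _ => (mx3_split c).symm)

-- === the sweep view equals B's closed-form (prefix-sum + running maxima) step ===

-- left sweep = prefix sums + running prefix max over entry values
theorem bSweep_closed (up : List Int) : ∀ (gs : List Int) (s M : Int),
    bSweep (s + M) (up.zip gs)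
      = List.zipWith (fun q x => q + x) (prefSums s gs)
          (pmGo M (List.zipWith (fun u q => u - q) up (prefSums s gs))) := by
  induction up with
  | nil => intro gs s M; cases gs <;> rfl
  | cons u up' ih =>
      intro gs s M
      cases gs with
      | nil => rfl
      | cons g gs' =>
          simp only [List.zip_cons_cons, bSweep, prefSums, List.zipWith_cons_cons, pmGo,
            List.cons.injEq]
          refine ⟨by omega, ?_⟩
          rw [show max u (s + M + g) = (s + g) + max M (u - (s + g)) from by omega]
          exact ih gs' (s + g) (max M (u - (s + g)))

theorem bSweep0_closed (up gs : List Int) :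
    bSweep0 (up.zip gs)
      = List.zipWith (fun q x => q + x) (prefSums 0 gs)
          (pmaxScan (List.zipWith (fun u q => u - q) up (prefSums 0 gs))) := by
  cases up with
  | nil => cases gs <;> rfl
  | cons u up' =>
      cases gs with
      | nil => rfl
      | cons g gs' =>
          simp only [List.zip_cons_cons, bSweep0, prefSums, List.zipWith_cons_cons, pmaxScan,
            List.cons.injEq]
          refine ⟨by omega, ?_⟩
          have hb := bSweep_closed up' gs' (0 + g) (u - (0 + g))
          rw [show (0:Int) + g + (u - (0 + g)) = u from by omega] at hb
          exact hb

theorem smaxScan_length (xs : List Int) : (smaxScan xs).length = xs.length := by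
  induction xs with
  | nil => rfl
  | cons x rest ih =>
      cases rest with
      | nil => rfl
      | cons y r2 => simp only [smaxScan, List.length_cons] at ih ⊢; omega

-- right sweep = suffix max of entry values minus the prefix sum left of c
theorem rspec_closed (up : List Int) : ∀ (gs : List Int) (s : Int),
    rspec (up.zip gs)
      = zip3With (fun q g sm => sm - q + g) (prefSums s gs) gs
          (smaxScan (zip3With (fun u q g => u + q - g) up (prefSums s gs) gs)) := by
  induction up with
  | nil => intro gs s; cases gs <;> rfl
  | cons u up' ih =>
      intro gs s
      cases gs with
      | nil => rfl
      | cons g gs' =>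
          cases up' with
          | nil =>
              cases gs' with
              | nil =>
                  simp [rspec, prefSums, zip3With, smaxScan]
                  omega
              | cons g2 gs'' =>
                  simp [rspec, prefSums, zip3With, smaxScan]
                  omega
          | cons u2 up'' =>
              cases gs' with
              | nil =>
                  simp [rspec, prefSums, zip3With, smaxScan]
                  omega
              | cons g2 gs'' =>
                  have ih' := ih (g2 :: gs'') (s + g)
                  obtain ⟨r0, Rt, hR⟩ : ∃ r0 Rt,
                      rspec ((u2 :: up'').zip (g2 :: gs'')) = r0 :: Rt := by
                    cases h : rspec ((u2 :: up'').zip (g2 :: gs'')) with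
                    | nil =>
                        have := congrArg List.length h
                        simp [rspec_length] at this
                    | cons a b => exact ⟨a, b, rfl⟩
                  obtain ⟨s0, St, hS⟩ : ∃ s0 St,
                      smaxScan ((u2 + (s + g + g2) - g2) :: zip3With (fun u q g => u + q - g)
                        up'' (prefSums (s + g + g2) gs'') gs'') = s0 :: St := by
                    cases h : smaxScan ((u2 + (s + g + g2) - g2) :: zip3With (fun u q g => u + q - g)
                        up'' (prefSums (s + g + g2) gs'') gs'') with
                    | nil =>
                        have := congrArg List.length h
                        simp [smaxScan_length] at this
                    | cons a b => exact ⟨a, b, rfl⟩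
                  have hS' : smaxScan (zip3With (fun u q g => u + q - g) (u2 :: up'')
                      (prefSums (s + g) (g2 :: gs'')) (g2 :: gs'')) = s0 :: St := hS
                  rw [hR, hS'] at ih'
                  simp only [prefSums, zip3With, List.cons.injEq] at ih'
                  obtain ⟨hr0, hRt⟩ := ih'
                  -- unfold the goal one level on each side
                  rw [show ((u :: u2 :: up'').zip (g :: g2 :: gs''))
                      = (u, g) :: ((u2 :: up'').zip (g2 :: gs'')) from by simp]
                  rw [show rspec ((u, g) :: ((u2 :: up'').zip (g2 :: gs'')))
                      = max u (g + r0) :: r0 :: Rt from by rw [rspec, hR]]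
                  rw [show prefSums s (g :: g2 :: gs'')
                      = (s + g) :: (s + g + g2) :: prefSums (s + g + g2) gs'' from rfl]
                  rw [show zip3With (fun u q g => u + q - g) (u :: u2 :: up'')
                        ((s + g) :: (s + g + g2) :: prefSums (s + g + g2) gs'')
                        (g :: g2 :: gs'')
                      = (u + (s + g) - g) :: (u2 + (s + g + g2) - g2)
                          :: zip3With (fun u q g => u + q - g) up''
                              (prefSums (s + g + g2) gs'') gs'' from rfl]
                  have hSfull : smaxScan ((u + (s + g) - g) :: (u2 + (s + g + g2) - g2)
                        :: zip3With (fun u q g => u + q - g) up''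
                            (prefSums (s + g + g2) gs'') gs'')
                      = max (u + (s + g) - g) s0 :: s0 :: St := by
                    simp only [smaxScan]
                    rw [hS]
                    simp
                  rw [hSfull]
                  simp only [zip3With, List.cons.injEq]
                  refine ⟨by omega, by omega, ?_⟩
                  exact hRt

-- combining the two sweeps pointwise equals B's final comprehension
theorem combine_closed : ∀ (pref pm sm gs : List Int),
    List.zipWith max (List.zipWith (fun q x => q + x) pref pm)
        (zip3With (fun q g smv => smv - q + g) pref gs sm)
      = zip3With (fun q pmv d => max (q + pmv) (d - q)) pref pm
          (List.zipWith (fun s g => s + g) sm gs) := by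
  intro pref
  induction pref with
  | nil => intro pm sm gs; cases pm <;> cases sm <;> cases gs <;> rfl
  | cons q pref' ih =>
      intro pm sm gs
      cases pm with
      | nil => cases sm <;> cases gs <;> rfl
      | cons pmv pm' =>
          cases sm with
          | nil => cases gs <;> rfl
          | cons smv sm' =>
              cases gs with
              | nil => rfl
              | cons g gs' =>
                  simp only [List.zipWith_cons_cons, zip3With, List.cons.injEq]
                  exact ⟨by omega, ih pm' sm' gs'⟩

-- the two zip3With argument lists in bStep, rewritten through up = prev + gs
theorem subList_eq (prev : List Int) : ∀ (gs pref : List Int),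
    List.zipWith (fun u q => u - q) (List.zipWith (fun p g => g + p) prev gs) pref
      = zip3With (fun p q g => p - q + g) prev pref gs := by
  induction prev with
  | nil => intro gs pref; cases gs <;> cases pref <;> rfl
  | cons p prev' ih =>
      intro gs pref
      cases gs with
      | nil => cases pref <;> rfl
      | cons g gs' =>
          cases pref with
          | nil => rfl
          | cons q pref' =>
              simp only [List.zipWith_cons_cons, zip3With, List.cons.injEq]
              exact ⟨by omega, ih gs' pref'⟩

theorem addList_eq (prev : List Int) : ∀ (gs pref : List Int), gs.length = pref.length →
    zip3With (fun u q g => u + q - g) (List.zipWith (fun p g => g + p) prev gs) pref gs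
      = List.zipWith (fun p q => p + q) prev pref := by
  induction prev with
  | nil => intro gs pref h; cases gs <;> cases pref <;> rfl
  | cons p prev' ih =>
      intro gs pref h
      cases gs with
      | nil =>
          cases pref with
          | nil => rfl
          | cons q pref' => simp at h
      | cons g gs' =>
          cases pref with
          | nil => simp at h
          | cons q pref' =>
              simp only [List.zipWith_cons_cons, zip3With, List.cons.injEq]
              exact ⟨by omega, ih gs' pref' (by simpa using h)⟩

theorem bStep_eq_sweep (prev gs : List Int) : bStep prev gs = sweepStep prev gs := by
  simp only [bStep, sweepStep]
  rw [bSweep0_closed, rspec_closed _ _ 0, subList_eq, addList_eq prev gs (prefSums 0 gs)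
    (by rw [prefSums_length])]
  exact (combine_closed (prefSums 0 gs)
    (pmaxScan (zip3With (fun p q g => p - q + g) prev (prefSums 0 gs) gs))
    (smaxScan (List.zipWith (fun p q => p + q) prev (prefSums 0 gs))) gs).symm

theorem step_eq (P : List (Int × Int × Int)) (gs : List Int) (h : P.length = gs.length) :
    bStep (P.map mx3) gs = (aStep P gs).map mx3 := by
  rw [bStep_eq_sweep]
  exact stepA_eq_sweep P gs h

theorem rows_eq (rss : List (List Int)) (P : List (Int × Int × Int))
    (h : ∀ r ∈ rss, r.length = P.length) :
    bRows (P.map mx3) rss = (aRows P rss).map mx3 := by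
  induction rss generalizing P with
  | nil => rfl
  | cons g rest ih =>
      simp only [bRows, aRows]
      have hg := h g (by simp)
      have hlen : (aStep P g).length = P.length := by rw [aStep_length]; omega
      rw [step_eq P g hg.symm]
      exact ih (aStep P g) (by intro r hr; rw [hlen]; exact h r (by simp [hr]))

theorem aRows_length (rss : List (List Int)) (P : List (Int × Int × Int))
    (h : ∀ r ∈ rss, r.length = P.length) :
    (aRows P rss).length = P.length := by
  induction rss generalizing P with
  | nil => rfl
  | cons g rest ih =>
      simp only [aRows]
      have hg := h g (by simp)
      have hlen : (aStep P g).length = P.length := by rw [aStep_length]; omega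
      rw [ih (aStep P g) (by intro r hr; rw [hlen]; exact h r (by simp [hr])), hlen]

-- ===== VERDICT (by name: the statement is the Claim_ definition above) =====
theorem solution_spec : Claim_equal_solution := by
  intro n m grid _ hpre
  obtain ⟨hn, hm, hng, hrow⟩ := hpre
  unfold Spec_solution
  cases grid with
  | nil => simp at hng; omega
  | cons g0 gtl =>
      simp only [solution, solution_alt, List.headD_cons]
      rw [show n.toNat = (n.toNat - 1) + 1 from by omega, List.take_succ_cons,
        show (n - 1).toNat = n.toNat - 1 from by omega,
        show (g0 :: gtl).drop 1 = gtl from rfl]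
      simp only [List.map_cons, List.headD_cons, List.tail_cons]
      rw [show (fun g : Int => ((g, g, g) : Int × Int × Int)) = triC from rfl]
      rw [dp0_eq (g0.take m.toNat)]
      have hlen : ∀ r ∈ (gtl.take (n.toNat - 1)).map (fun r => r.take m.toNat),
          r.length = m.toNat := by
        intro r hr
        simp only [List.mem_map] at hr
        obtain ⟨a, ha, rfl⟩ := hr
        have hma := hrow a (by
          rw [show n.toNat = (n.toNat - 1) + 1 from by omega, List.take_succ_cons]
          exact List.mem_cons_of_mem _ ha)
        simp only [List.length_take]
        omega
      have hr0 : (g0.take m.toNat).length = m.toNat := by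
        have hma := hrow g0 (by
          rw [show n.toNat = (n.toNat - 1) + 1 from by omega, List.take_succ_cons]
          exact List.mem_cons_self)
        simp only [List.length_take]
        omega
      have hP0len : ((prefSums 0 (g0.take m.toNat)).map triC).length = m.toNat := by
        simp [prefSums_length, hr0]
      have htail : ∀ r ∈ (gtl.take (n.toNat - 1)).map (fun r => r.take m.toNat),
          r.length = ((prefSums 0 (g0.take m.toNat)).map triC).length := by
        intro r hr
        rw [hP0len]
        exact hlen r hr
      have hprev : prefSums 0 (g0.take m.toNat)
          = ((prefSums 0 (g0.take m.toNat)).map triC).map mx3 := by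
        rw [List.map_map]
        have hco : mx3 ∘ triC = id := by funext x; simp [mx3_tri]
        rw [hco, List.map_id]
      have hB : bRows (prefSums 0 (g0.take m.toNat))
            ((gtl.take (n.toNat - 1)).map (fun r => r.take m.toNat))
          = (aRows ((prefSums 0 (g0.take m.toNat)).map triC)
              ((gtl.take (n.toNat - 1)).map (fun r => r.take m.toNat))).map mx3 := by
        conv_lhs => rw [hprev]
        exact rows_eq _ _ htail
      have hane : aRows ((prefSums 0 (g0.take m.toNat)).map triC)
          ((gtl.take (n.toNat - 1)).map (fun r => r.take m.toNat)) ≠ [] := by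
        intro hh
        have hl := congrArg List.length hh
        rw [aRows_length _ _ htail, hP0len] at hl
        simp only [List.length_nil] at hl
        omega
      rw [hB, getLastD_map_ne mx3 _ hane 0 (0, 0, 0)]
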